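-- pv_equiv track=rewrite | github.com/zznidar/OP2021 | vaje/DN4/plesalci.py | vsi_pari
-- ===== SOURCE A (Python) =====
-- def par(prvi, drugi, erlaubt):
--     # identifikacijska številka, ime, nivo znanja, spol
--     if(prvi[3] != drugi[3] and abs(prvi[2] - drugi[2]) <= erlaubt):
--         return((prvi[0], drugi[0]) if prvi[0] < drugi[0] else (drugi[0], prvi[0]))
--
-- def vsi_pari(plesalci, erlaubt):
--     out = set()
--     p = list(plesalci.items())
--     for i in range(len(p)):
--         for let_i in p[i+1:]:
--             parus = par([p[i][0], *p[i][1]], [let_i[0], *let_i[1]], erlaubt) # ker znotraj terke ne moremo spreadati, pac naredimo list :shrug: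
--             if(parus):
--                 out.add(parus)
--     return(out)
-- ===== SOURCE B (Python) =====
-- def vsi_pari(plesalci, erlaubt):
--     # One destructive pass: pop each dancer off the front and match it against
--     # the remaining suffix; collect plain tuples and deduplicate once at the end.
--     rest = list(plesalci.items())
--     out = []
--     while rest:
--         ida, (_, la, ga) = rest.pop(0)
--         out += [(min(ida, idb), max(ida, idb))
--                 for idb, (_, lb, gb) in rest
--                 if gb != ga and abs(la - lb) <= erlaubt]
--     return set(out)
-- ===== Notes on version B (the rewrite author's own statement) =====
-- stated objective: simpler
-- what changed: Replaced the index/slice double loop with the helper 'par' (returning None and tested by truthiness) and incremental set.add by one destructive pass that pops each dancer and matches it against the remaining suffix with a comprehension using min/max, deduplicating once with set() at the end.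
import Mathlib
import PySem

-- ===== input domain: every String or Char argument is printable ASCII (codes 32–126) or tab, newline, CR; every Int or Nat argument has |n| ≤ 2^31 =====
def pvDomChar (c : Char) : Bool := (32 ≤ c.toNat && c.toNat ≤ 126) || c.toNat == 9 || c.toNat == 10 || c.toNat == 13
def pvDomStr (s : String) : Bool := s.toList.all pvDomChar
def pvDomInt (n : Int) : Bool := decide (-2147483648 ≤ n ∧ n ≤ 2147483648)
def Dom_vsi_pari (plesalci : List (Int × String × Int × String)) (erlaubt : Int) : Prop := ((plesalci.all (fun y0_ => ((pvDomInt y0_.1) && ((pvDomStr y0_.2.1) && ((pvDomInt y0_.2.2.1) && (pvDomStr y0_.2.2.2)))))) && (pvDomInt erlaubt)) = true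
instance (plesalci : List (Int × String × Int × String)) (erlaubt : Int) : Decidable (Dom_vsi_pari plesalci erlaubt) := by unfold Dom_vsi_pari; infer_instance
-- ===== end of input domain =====

-- ===== PORT A =====
-- B replaces A's index/slice double loop + helper-and-truthiness + incremental set.add
-- by one structural pass over suffixes collecting a flat list, deduplicated once at the end (objective: simpler).

-- helper 'par' of A (the two heterogeneous lists [id, name, level, gender] become 4-tuples)
def par (prvi drugi : Int × String × Int × String) (erlaubt : Int) : Option (Int × Int) :=
  if prvi.2.2.2 ≠ drugi.2.2.2 ∧ |prvi.2.2.1 - drugi.2.2.1| ≤ erlaubt then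
    some (if prvi.1 < drugi.1 then (prvi.1, drugi.1) else (drugi.1, prvi.1))
  else none

def vsi_pari (plesalci : List (Int × String × Int × String)) (erlaubt : Int) : List (Int × Int) :=
  -- p = list(plesalci.items())  (the dict's items, insertion order, unique keys)
  let p : List (Int × String × Int × String) := (PySem.Dict.ofList plesalci).items
  (PySem.List.pyRange 0 (p.length : Int) 1).foldl
    (fun out i =>
      (PySem.List.slice p (some (i + 1)) none).foldl
        (fun out let_i =>
          match par (PySem.List.pyGetD p i (0, "", 0, "")) let_i erlaubt with
          | some parus => PySem.Set.add out parus   -- if(parus): out.add(parus)  (a 2-tuple is always truthy)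
          | none => out)
        out)
    PySem.Set.empty

-- ===== PORT B =====
-- while rest: head = rest.pop(0); out += [pairs of head with the remaining suffix]
def vsi_pari_go (erlaubt : Int) :
    List (Int × String × Int × String) → List (Int × Int) → List (Int × Int)
  | [], out => out
  | x :: rest, out =>
      vsi_pari_go erlaubt rest
        (out ++ (rest.filter
            (fun y => y.2.2.2 != x.2.2.2 && decide (|x.2.2.1 - y.2.2.1| ≤ erlaubt))).map
          (fun y => (min x.1 y.1, max x.1 y.1)))

def vsi_pari_alt (plesalci : List (Int × String × Int × String)) (erlaubt : Int) : List (Int × Int) :=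
  PySem.Set.ofList (vsi_pari_go erlaubt (PySem.Dict.ofList plesalci).items [])

-- ===== PRECONDITION & SPEC =====
def Spec_vsi_pari (plesalci : List (Int × String × Int × String)) (erlaubt : Int) (out : List (Int × Int)) : Prop := out = vsi_pari_alt plesalci erlaubt
instance (plesalci : List (Int × String × Int × String)) (erlaubt : Int) (out : List (Int × Int)) : Decidable (Spec_vsi_pari plesalci erlaubt out) := by unfold Spec_vsi_pari; infer_instance

-- ===== CLAIM (what is proved, stated in full; the proofs are below) =====
def Claim_equal_vsi_pari : Prop := ∀ (plesalci : List (Int × String × Int × String)) (erlaubt : Int), Dom_vsi_pari plesalci erlaubt → Spec_vsi_pari plesalci erlaubt (vsi_pari plesalci erlaubt)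

-- ===== LEMMAS AND PROOFS =====
-- the qualifying pairs of one dancer x against the suffix after it (B's inner comprehension)
def pvChunk (e : Int) (x : Int × String × Int × String)
    (rest : List (Int × String × Int × String)) : List (Int × Int) :=
  (rest.filter (fun y => y.2.2.2 != x.2.2.2 && decide (|x.2.2.1 - y.2.2.1| ≤ e))).map
    (fun y => (min x.1 y.1, max x.1 y.1))

-- all qualifying pairs, in A's lexicographic discovery order
def pvPairs (e : Int) : List (Int × String × Int × String) → List (Int × Int)
  | [] => []
  | x :: rest => pvChunk e x rest ++ pvPairs e rest

theorem pv_go_eq (e : Int) (l : List (Int × String × Int × String)) :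
    ∀ out, vsi_pari_go e l out = out ++ pvPairs e l := by
  induction l with
  | nil => intro out; simp [vsi_pari_go, pvPairs]
  | cons x rest ih =>
      intro out
      simp [vsi_pari_go, pvPairs, ih, pvChunk, List.append_assoc]

theorem pv_pair_minmax (a b : Int) :
    (if a < b then (a, b) else (b, a)) = (min a b, max a b) := by
  split <;> simp [min_def, max_def] <;> omega

theorem pv_inner_eq (e : Int) (x : Int × String × Int × String) :
    ∀ (rest : List (Int × String × Int × String)) (out : PySem.Set (Int × Int)),
      rest.foldl
        (fun out y =>
          match par x y e with
          | some parus => PySem.Set.add out parus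
          | none => out) out
      = List.foldl PySem.Set.add out (pvChunk e x rest) := by
  intro rest
  induction rest with
  | nil => intro out; simp [pvChunk]
  | cons y t ih =>
      intro out
      by_cases h : x.2.2.2 ≠ y.2.2.2 ∧ |x.2.2.1 - y.2.2.1| ≤ e
      · have hpar : par x y e = some (min x.1 y.1, max x.1 y.1) := by
          rw [par, if_pos h, pv_pair_minmax]
        have hb : (y.2.2.2 != x.2.2.2 && decide (|x.2.2.1 - y.2.2.1| ≤ e)) = true := by
          simp [bne_iff_ne, h.2]; exact fun hc => h.1 hc.symm
        have ih' := ih (PySem.Set.add out (min x.1 y.1, max x.1 y.1))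
        simp only [pvChunk] at ih'
        simp [pvChunk, hb, hpar, ih']
      · have hpar : par x y e = none := by rw [par, if_neg h]
        have hb : (y.2.2.2 != x.2.2.2 && decide (|x.2.2.1 - y.2.2.1| ≤ e)) = false := by
          rcases not_and_or.mp h with h1 | h2
          · simp [bne_iff_ne]; intro hc; exact absurd (Ne.symm hc) h1
          · simp [h2]
        have ih' := ih out
        simp only [pvChunk] at ih'
        simp [pvChunk, hb, hpar, ih']

theorem pv_outer_eq (e : Int) (p : List (Int × String × Int × String)) :
    ∀ (m k : Nat) (out : PySem.Set (Int × Int)), p.length - k = m →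
      ((PySem.List.pyRange (k : Int) (p.length : Int) 1).foldl
        (fun out i =>
          (PySem.List.slice p (some (i + 1)) none).foldl
            (fun out let_i =>
              match par (PySem.List.pyGetD p i (0, "", 0, "")) let_i e with
              | some parus => PySem.Set.add out parus
              | none => out)
            out)
        out)
      = List.foldl PySem.Set.add out (pvPairs e (p.drop k)) := by
  intro m
  induction m with
  | zero =>
      intro k out hm
      have hk : p.length ≤ k := by omega
      rw [PySem.List.pyRange_one_eq_nil (by exact_mod_cast hk)]
      rw [List.drop_eq_nil_of_le hk]
      simp [pvPairs]
  | succ m ih =>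
      intro k out hm
      have hk : k < p.length := by omega
      rw [PySem.List.pyRange_one_cons (by exact_mod_cast hk)]
      rw [List.foldl_cons]
      have hslice : PySem.List.slice p (some ((k : Int) + 1)) none = p.drop (k + 1) := by
        have : ((k : Int) + 1) = ((k + 1 : Nat) : Int) := by push_cast; ring
        rw [this, PySem.List.slice_from_natCast]
      have hget : PySem.List.pyGetD p (k : Int) (0, "", 0, "") = p[k] := by
        simp [List.getElem?_eq_getElem hk]
      rw [hslice, hget, pv_inner_eq]
      have hcast : ((k : Int) + 1) = ((k + 1 : Nat) : Int) := by push_cast; ring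
      rw [hcast, ih (k + 1) _ (by omega)]
      rw [List.drop_eq_getElem_cons hk]
      simp [pvPairs, List.foldl_append]

theorem vsi_pari_eq_fold (plesalci : List (Int × String × Int × String)) (erlaubt : Int) :
    vsi_pari plesalci erlaubt
      = List.foldl PySem.Set.add []
          (pvPairs erlaubt (PySem.Dict.ofList plesalci).items) := by
  have h := pv_outer_eq erlaubt (PySem.Dict.ofList plesalci).items
    (PySem.Dict.ofList plesalci).items.length 0 PySem.Set.empty (by omega)
  simpa [vsi_pari, PySem.Set.empty] using h

-- ===== VERDICT (by name: the statement is the Claim_ definition above) =====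
theorem vsi_pari_spec : Claim_equal_vsi_pari := by
  intro plesalci erlaubt _
  unfold Spec_vsi_pari
  rw [vsi_pari_eq_fold, vsi_pari_alt, pv_go_eq, List.nil_append,
    PySem.Set.ofList_eq_foldl]
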